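-- pv_equiv track=rewrite | github.com/Ashiq-am/Path-of-Python | 3.Data Types/Arrays Set 1 and Set 2/Prefix/Total cuts such that sum of largest of left and smallest of right is atleast K/Total cuts such that sum of largest of left and smallest of right is atleast K.py | totalCuts
-- ===== SOURCE A (Python) =====
-- def totalCuts(N, K, A):
-- 	max_val = -1
-- 	index = 0
-- 	count = 0
-- 	minRight = [0] * N
-- 	minRight[N - 1] = A[N - 1]
--
-- 	# Loop to store the minimum from
-- 	# right end till i
-- 	for i in range(N - 2, -1, -1):
-- 		if A[i] < minRight[i + 1]:
-- 			minRight[i] = A[i]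
-- 		else:
-- 			minRight[i] = minRight[i + 1]
--
-- 	# Loop to find the number of
-- 	# possible cuts
-- 	for i in range(N - 1):
-- 		max_val = max(max_val, A[i])
-- 		if max_val + minRight[i + 1] >= K:
-- 			count += 1
--
-- 	return count
-- ===== SOURCE B (Python) =====
-- def totalCuts(N, K, A):
--     # suffix minima of A[0..N-1] (same array A builds)
--     suffMin = [0] * N
--     suffMin[N - 1] = A[N - 1]
--     for i in range(N - 2, -1, -1):
--         suffMin[i] = min(A[i], suffMin[i + 1])
--     # prefix maxima (seeded with -1 exactly like A's running max)
--     cur = -1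
--     prefMax = []
--     for i in range(N):
--         cur = max(cur, A[i])
--         prefMax.append(cur)
--     # g(i) = prefMax[i] + suffMin[i+1] is non-decreasing in i, so the
--     # qualifying cuts form a suffix of [0, N-2]: binary-search its start.
--     lo, hi = 0, N - 1
--     while lo < hi:
--         mid = (lo + hi) // 2
--         if prefMax[mid] + suffMin[mid + 1] >= K:
--             hi = mid
--         else:
--             lo = mid + 1
--     return (N - 1) - lo
-- ===== Notes on version B (the rewrite author's own statement) =====
-- stated objective: alternative
-- what changed: replaces A's linear counting pass (running max + test at every cut) by precomputing the prefix-max array and binary-searching for the first index where prefixMax[i]+suffixMin[i+1] >= K, which is monotone, returning (N-1)-index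
import Mathlib
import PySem

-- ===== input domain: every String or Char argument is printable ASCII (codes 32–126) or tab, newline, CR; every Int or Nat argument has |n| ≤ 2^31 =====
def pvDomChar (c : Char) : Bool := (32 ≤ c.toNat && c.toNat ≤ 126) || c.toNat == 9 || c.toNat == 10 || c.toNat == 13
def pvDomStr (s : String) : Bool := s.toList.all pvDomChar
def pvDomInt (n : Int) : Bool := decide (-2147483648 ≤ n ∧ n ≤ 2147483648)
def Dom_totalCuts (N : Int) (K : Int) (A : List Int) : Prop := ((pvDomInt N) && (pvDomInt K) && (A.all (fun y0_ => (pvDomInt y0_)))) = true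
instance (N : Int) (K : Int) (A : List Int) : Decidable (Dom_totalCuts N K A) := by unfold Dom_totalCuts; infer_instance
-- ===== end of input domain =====

-- B replaces A's linear counting pass by a binary search over the monotone
-- quantity prefixMax[i]+suffixMin[i+1]; equal return values on Pre_ are proved.

-- shared indexing helper: xs[i] for the in-range indices Pre_ guarantees
def pvGetI (xs : List Int) (i : Nat) : Int := xs.getD i 0

-- ===== PORT A =====
-- iteration i of A's downward minRight-filling loop
def pvStepA (A : List Int) (mr : List Int) (k : Nat) : List Int :=
  if pvGetI A k < pvGetI mr (k + 1) then mr.set k (pvGetI A k)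
  else mr.set k (pvGetI mr (k + 1))

-- A's 'for i in range(N-2,-1,-1)' loop: pvFillA A mr (n-1) runs i = n-2 … 0
def pvFillA (A : List Int) : List Int → Nat → List Int
  | mr, 0 => mr
  | mr, k + 1 => pvFillA A (pvStepA A mr k) k

def totalCuts (N : Int) (K : Int) (A : List Int) : Int :=
  let n := N.toNat
  let minRight := pvFillA A ((List.replicate n 0).set (n - 1) (pvGetI A (n - 1))) (n - 1)
  let res := (List.range (n - 1)).foldl
    (fun (st : Int × Int) i =>
      let mv := max st.1 (pvGetI A i)
      (mv, if K ≤ mv + pvGetI minRight (i + 1) then st.2 + 1 else st.2)) (-1, 0)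
  res.2

-- ===== PORT B =====
-- iteration i of B's downward suffMin-filling loop (min instead of A's if)
def pvStepB (A : List Int) (mr : List Int) (k : Nat) : List Int :=
  mr.set k (min (pvGetI A k) (pvGetI mr (k + 1)))

def pvFillB (A : List Int) : List Int → Nat → List Int
  | mr, 0 => mr
  | mr, k + 1 => pvFillB A (pvStepB A mr k) k

-- B's forward prefix-max pass: state (cur, prefMax)
def pvPrefMax (A : List Int) (n : Nat) : List Int :=
  ((List.range n).foldl (fun (st : Int × List Int) i =>
    (max st.1 (pvGetI A i), st.2 ++ [max st.1 (pvGetI A i)])) (-1, [])).2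

-- B's while-loop, fuel-bounded (fuel = n suffices since hi-lo shrinks)
def pvBS (pm sm : List Int) (K : Int) : Nat → Nat → Nat → Nat
  | 0, lo, _ => lo
  | fuel + 1, lo, hi =>
    if lo < hi then
      if K ≤ pvGetI pm ((lo + hi) / 2) + pvGetI sm ((lo + hi) / 2 + 1) then
        pvBS pm sm K fuel lo ((lo + hi) / 2)
      else pvBS pm sm K fuel ((lo + hi) / 2 + 1) hi
    else lo

def totalCuts_alt (N : Int) (K : Int) (A : List Int) : Int :=
  let n := N.toNat
  let suffMin := pvFillB A ((List.replicate n 0).set (n - 1) (pvGetI A (n - 1))) (n - 1)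
  let prefMax := pvPrefMax A n
  let lo := pvBS prefMax suffMin K n 0 (n - 1)
  (N - 1) - (lo : Int)

-- ===== PRECONDITION & SPEC =====
-- exactly the inputs on which Python A returns (otherwise both A and B raise IndexError)
def Pre_totalCuts (N : Int) (K : Int) (A : List Int) : Prop := 1 ≤ N ∧ N ≤ (A.length : Int)
instance (N : Int) (K : Int) (A : List Int) : Decidable (Pre_totalCuts N K A) := by unfold Pre_totalCuts; infer_instance
def pvWitness_totalCuts : Int × Int × List Int := (3, 4, [2, 1, 3])

def Spec_totalCuts (N : Int) (K : Int) (A : List Int) (out : Int) : Prop := out = totalCuts_alt N K A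
instance (N : Int) (K : Int) (A : List Int) (out : Int) : Decidable (Spec_totalCuts N K A out) := by unfold Spec_totalCuts; infer_instance

-- ===== CLAIM (what is proved, stated in full; the proofs are below) =====
def Claim_equal_totalCuts : Prop := ∀ (N : Int) (K : Int) (A : List Int), Dom_totalCuts N K A → Pre_totalCuts N K A → Spec_totalCuts N K A (totalCuts N K A)

-- ===== LEMMAS AND PROOFS =====

-- running maximum after t iterations of A's second loop (seeded with -1)
def pvMx (A : List Int) : Nat → Int
  | 0 => -1
  | t + 1 => max (pvMx A t) (pvGetI A t)

-- minimum of the last d+1 entries of A[0..n-1]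
def pvSmAux (A : List Int) (n : Nat) : Nat → Int
  | 0 => pvGetI A (n - 1)
  | d + 1 => min (pvGetI A (n - 1 - (d + 1))) (pvSmAux A n d)

-- suffix minimum at index j
def pvMR (A : List Int) (n j : Nat) : Int := pvSmAux A n (n - 1 - j)

theorem pvFillB_eq_fillA (A : List Int) : ∀ mr k, pvFillB A mr k = pvFillA A mr k := by
  intro mr k
  induction k generalizing mr with
  | zero => rfl
  | succ k ih =>
    show pvFillB A (pvStepB A mr k) k = pvFillA A (pvStepA A mr k) k
    rw [ih]
    congr 1
    unfold pvStepA pvStepB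
    rcases lt_trichotomy (pvGetI A k) (pvGetI mr (k + 1)) with h | h | h
    · rw [if_pos h, min_eq_left h.le]
    · rw [if_neg (by omega), min_eq_left h.le, h]
    · rw [if_neg (by omega), min_eq_right h.le]

theorem pvFillA_spec (A : List Int) (n : Nat) :
    ∀ k mr, k ≤ n - 1 → mr.length = n →
    (∀ j, k ≤ j → j ≤ n - 1 → pvGetI mr j = pvMR A n j) →
    ∀ j, j ≤ n - 1 → pvGetI (pvFillA A mr k) j = pvMR A n j := by
  intro k
  induction k with
  | zero => intro mr _ _ h j hj; exact h j (Nat.zero_le j) hj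
  | succ k ih =>
    intro mr hk hlen h j hj
    show pvGetI (pvFillA A (pvStepA A mr k) k) j = pvMR A n j
    have hklt : k < n := by omega
    refine ih (pvStepA A mr k) (by omega) ?_ ?_ j hj
    · unfold pvStepA; split <;> simp [hlen]
    · intro u hu1 hu2
      rcases Nat.eq_or_lt_of_le hu1 with heq | hlt
      · -- u = k : the freshly set entry
        subst heq
        have hk1 : pvGetI mr (k + 1) = pvMR A n (k + 1) := h (k + 1) (by omega) (by omega)
        have hget : ∀ (v : Int), pvGetI (mr.set k v) k = v := by
          intro v
          unfold pvGetI
          rw [List.getD_eq_getElem?_getD, List.getElem?_set_self (by omega)]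
          rfl
        have hmr : pvMR A n k = min (pvGetI A k) (pvMR A n (k + 1)) := by
          unfold pvMR
          have h1 : n - 1 - k = (n - 1 - (k + 1)) + 1 := by omega
          rw [h1]
          show min (pvGetI A (n - 1 - ((n - 1 - (k + 1)) + 1))) _ = _
          congr 2
          omega
        unfold pvStepA
        rcases lt_trichotomy (pvGetI A k) (pvGetI mr (k + 1)) with hc | hc | hc
        · rw [if_pos hc, hget, hmr, ← hk1, min_eq_left hc.le]
        · rw [if_neg (by omega), hget, hmr, ← hk1, min_eq_left hc.le, hc]
        · rw [if_neg (by omega), hget, hmr, ← hk1, min_eq_right hc.le]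
      · -- u > k : untouched by the set
        have huk : pvGetI (pvStepA A mr k) u = pvGetI mr u := by
          unfold pvStepA pvGetI
          split <;>
            (rw [List.getD_eq_getElem?_getD, List.getElem?_set_ne (by omega),
              ← List.getD_eq_getElem?_getD])
        rw [huk]
        exact h u (by omega) hu2

theorem pvMinRight_spec (A : List Int) (n : Nat) (hn : 1 ≤ n) (hlen : n ≤ A.length) :
    ∀ j, j ≤ n - 1 →
      pvGetI (pvFillA A ((List.replicate n 0).set (n - 1) (pvGetI A (n - 1))) (n - 1)) j
        = pvMR A n j := by
  apply pvFillA_spec A n (n - 1) _ (le_refl _) (by simp)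
  intro j hj1 hj2
  have hj : j = n - 1 := by omega
  subst hj
  unfold pvGetI pvMR
  rw [List.getD_eq_getElem?_getD, List.getElem?_set_self (by simpa using by omega)]
  have : n - 1 - (n - 1) = 0 := by omega
  rw [this]
  rfl

-- prefix-max pass characterisation
theorem pvPrefMax_fold (A : List Int) (n : Nat) :
    (List.range n).foldl (fun (st : Int × List Int) i =>
      (max st.1 (pvGetI A i), st.2 ++ [max st.1 (pvGetI A i)])) (-1, [])
    = (pvMx A n, (List.range n).map (fun i => pvMx A (i + 1))) := by
  induction n with
  | zero => rfl
  | succ n ih =>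
    rw [List.range_succ, List.foldl_append, ih]
    simp [pvMx]

theorem pvPrefMax_get (A : List Int) (n : Nat) (i : Nat) (hi : i < n) :
    pvGetI (pvPrefMax A n) i = pvMx A (i + 1) := by
  unfold pvPrefMax
  rw [pvPrefMax_fold]
  unfold pvGetI
  rw [List.getD_eq_getElem?_getD, List.getElem?_map, List.getElem?_range hi]
  rfl

-- monotonicity of pvMx
theorem pvMx_mono (A : List Int) : ∀ s t, s ≤ t → pvMx A s ≤ pvMx A t := by
  intro s t h
  induction t with
  | zero => simp_all
  | succ t ih =>
    rcases Nat.eq_or_lt_of_le h with heq | hlt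
    · subst heq; exact le_refl _
    · exact le_trans (ih (by omega)) (le_max_left _ _)

-- monotonicity of the suffix minimum
theorem pvMR_mono (A : List Int) (n : Nat) (j : Nat) (hj : j + 1 ≤ n - 1) :
    pvMR A n j ≤ pvMR A n (j + 1) := by
  unfold pvMR
  have h1 : n - 1 - j = (n - 1 - (j + 1)) + 1 := by omega
  rw [h1]
  exact min_le_right _ _

-- g-monotonicity used by both the counting argument and the binary search
theorem pvG_mono (A : List Int) (n : Nat) :
    ∀ i j, i ≤ j → j < n - 1 →
      pvMx A (i + 1) + pvMR A n (i + 1) ≤ pvMx A (j + 1) + pvMR A n (j + 1) := by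
  intro i j h hj
  induction j with
  | zero =>
    obtain rfl := Nat.le_zero.mp h
    exact le_refl _
  | succ j ih =>
    rcases Nat.eq_or_lt_of_le h with heq | hlt
    · subst heq; exact le_refl _
    · have h1 := ih (by omega) (by omega)
      have h2 : pvMx A (j + 1) ≤ pvMx A (j + 1 + 1) := pvMx_mono A _ _ (by omega)
      have h3 : pvMR A n (j + 1) ≤ pvMR A n (j + 1 + 1) := pvMR_mono A n (j + 1) (by omega)
      omega

-- A's counting fold computes (running max, number of qualifying cuts so far)
theorem pvCount_fold (A mr : List Int) (n : Nat) (K : Int)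
    (hmr : ∀ j, 1 ≤ j → j ≤ n - 1 → pvGetI mr j = pvMR A n j) :
    ∀ t, t ≤ n - 1 →
    (List.range t).foldl
      (fun (st : Int × Int) i =>
        (max st.1 (pvGetI A i),
         if K ≤ max st.1 (pvGetI A i) + pvGetI mr (i + 1) then st.2 + 1 else st.2)) (-1, 0)
    = (pvMx A t,
       (((List.range t).filter (fun i => decide (K ≤ pvMx A (i + 1) + pvMR A n (i + 1)))).length : Int)) := by
  intro t ht
  induction t with
  | zero => rfl
  | succ t ih =>
    rw [List.range_succ, List.foldl_append, ih (by omega), List.filter_append]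
    have hmx : max (pvMx A t) (pvGetI A t) = pvMx A (t + 1) := rfl
    have hmrt : pvGetI mr (t + 1) = pvMR A n (t + 1) := hmr (t + 1) (by omega) (by omega)
    simp only [List.foldl_cons, List.foldl_nil, hmx, hmrt, List.filter_cons, List.filter_nil,
      List.length_append]
    by_cases hc : K ≤ pvMx A (t + 1) + pvMR A n (t + 1)
    · simp [hc]
    · simp [hc]

-- binary-search bracketing invariant
theorem pvBS_spec (pm sm : List Int) (K : Int) (m : Nat) (g : Nat → Int)
    (hq : ∀ i, i < m → pvGetI pm i + pvGetI sm (i + 1) = g i)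
    (hmono : ∀ i j, i ≤ j → j < m → g i ≤ g j) :
    ∀ fuel lo hi, lo ≤ hi → hi ≤ m → hi - lo ≤ fuel →
      (∀ i, i < lo → g i < K) → (∀ i, hi ≤ i → i < m → K ≤ g i) →
      (pvBS pm sm K fuel lo hi ≤ m ∧
       (∀ i, i < pvBS pm sm K fuel lo hi → g i < K) ∧
       (∀ i, pvBS pm sm K fuel lo hi ≤ i → i < m → K ≤ g i)) := by
  intro fuel
  induction fuel with
  | zero =>
    intro lo hi h1 h2 h3 h4 h5
    have : lo = hi := by omega
    subst this
    exact ⟨h2, h4, h5⟩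
  | succ fuel ih =>
    intro lo hi h1 h2 h3 h4 h5
    show (pvBS pm sm K (fuel + 1) lo hi ≤ m ∧ _)
    unfold pvBS
    by_cases hlh : lo < hi
    · rw [if_pos hlh]
      have hmid1 : lo ≤ (lo + hi) / 2 := by omega
      have hmid2 : (lo + hi) / 2 < hi := by omega
      have hmidm : (lo + hi) / 2 < m := by omega
      rw [hq _ hmidm]
      by_cases hc : K ≤ g ((lo + hi) / 2)
      · rw [if_pos hc]
        exact ih lo ((lo + hi) / 2) hmid1 (by omega) (by omega) h4
          (fun i hi1 hi2 => le_trans hc (hmono _ i hi1 hi2))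
      · rw [if_neg hc]
        refine ih ((lo + hi) / 2 + 1) hi (by omega) h2 (by omega) ?_ h5
        intro i hilt
        have : g i ≤ g ((lo + hi) / 2) := hmono i _ (by omega) hmidm
        omega
    · rw [if_neg hlh]
      have : lo = hi := by omega
      subst this
      exact ⟨h2, h4, h5⟩

-- counting a predicate that holds exactly from r on
theorem pvFilter_count (p : Nat → Prop) [DecidablePred p] :
    ∀ m r, r ≤ m → (∀ i, i < r → ¬ p i) → (∀ i, r ≤ i → i < m → p i) →
      ((List.range m).filter (fun i => decide (p i))).length = m - r := by
  intro m
  induction m with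
  | zero => intro r h1 _ _; interval_cases r; rfl
  | succ m ih =>
    intro r h1 h2 h3
    rw [List.range_succ, List.filter_append, List.length_append]
    by_cases hrm : r ≤ m
    · have hpm : p m := h3 m hrm (by omega)
      rw [ih r hrm h2 (fun i a b => h3 i a (by omega))]
      simp only [List.filter_cons, List.filter_nil, decide_eq_true (by exact hpm)]
      simp
      omega
    · have hr1 : r = m + 1 := by omega
      subst hr1
      rw [ih m (by omega) (fun i a => h2 i (by omega)) (fun i a b => by omega)]
      have hnp : ¬ p m := h2 m (by omega)
      simp [hnp]

-- ===== VERDICT (by name: the statement is the Claim_ definition above) =====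
theorem totalCuts_spec : Claim_equal_totalCuts := by
  intro N K A _ hpre
  obtain ⟨hN1, hNlen⟩ := hpre
  simp only [Spec_totalCuts, totalCuts, totalCuts_alt]
  set n := N.toNat with hn
  have hn1 : 1 ≤ n := by omega
  have hnlen : n ≤ A.length := by omega
  -- the shared arrays
  set mr := pvFillA A ((List.replicate n 0).set (n - 1) (pvGetI A (n - 1))) (n - 1) with hmrdef
  have hmr : ∀ j, j ≤ n - 1 → pvGetI mr j = pvMR A n j := pvMinRight_spec A n hn1 hnlen
  rw [pvFillB_eq_fillA]
  -- A's side: the fold is the filter count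
  rw [pvCount_fold A mr n K (fun j _ hb => hmr j hb) (n - 1) (le_refl _)]
  -- B's side: the binary search brackets the same predicate
  set g : Nat → Int := fun i => pvMx A (i + 1) + pvMR A n (i + 1) with hg
  have hq : ∀ i, i < n - 1 → pvGetI (pvPrefMax A n) i + pvGetI mr (i + 1) = g i := by
    intro i hi
    rw [pvPrefMax_get A n i (by omega), hmr (i + 1) (by omega)]
  have hbs := pvBS_spec (pvPrefMax A n) mr K (n - 1) g hq
    (fun i j hij hj => pvG_mono A n i j hij hj)
    n 0 (n - 1) (by omega) (le_refl _) (by omega)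
    (by omega) (by intro i h1 h2; omega)
  set r := pvBS (pvPrefMax A n) mr K n 0 (n - 1) with hr
  obtain ⟨hrm, hlow, hhigh⟩ := hbs
  have hcnt := pvFilter_count (fun i => K ≤ g i) (n - 1) r hrm
    (fun i hi => by have := hlow i hi; omega) hhigh
  simp only [hg] at hcnt
  rw [hcnt]
  have : (N : Int) - 1 = ((n - 1 : Nat) : Int) := by omega
  rw [this]
  omega
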